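-- pv_equiv track=rewrite | github.com/RicardoAlc1988/Contests | HackerRank/Mandragora Forest.py | mandragora
-- ===== SOURCE A (Python) =====
-- def mandragora(H):
--     # Write your code here
--     H.sort()
--     n = len(H)
--     accumulated_sum = H[n-1]
--     temp_sol = 0
--     max_sol = n * H[-1]
--     previous_sol = max_sol
--     k = n-2
--     while(k >= 0):
--         temp_sol = previous_sol - accumulated_sum
--         accumulated_sum = accumulated_sum + H[k]
--         temp_sol = temp_sol + (k + 1) * H[k]
--         if temp_sol > max_sol:
--             max_sol = temp_sol
--         previous_sol = temp_sol
--         temp_sol = 0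
--         k = k - 1
--     return max_sol
-- ===== SOURCE B (Python) =====
-- def mandragora(H):
--     # Staged decomposition: (1) sort a copy, (2) build the table of suffix sums
--     # back-to-front by accumulating over the reversed list, (3) take the max of
--     # the directly computed candidates (n - j) * sufs[j].
--     # (A sorts H in place; B leaves the argument untouched.)
--     hs = sorted(H)
--     sufs = []
--     acc = 0
--     for h in reversed(hs):
--         acc += h
--         sufs.append(acc)
--     # sufs[j] = sum of the largest j+1 healths; battling exactly those happens at strength n-j
--     n = len(hs)
--     return max((n - j) * sufs[j] for j in range(n))
-- ===== Notes on version B (the rewrite author's own statement) =====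
-- stated objective: alternative
-- what changed: Replaces A's single backward loop with an incremental candidate recurrence (previous_sol minus a running accumulated sum, seeded from H[-1], max tracked inside the loop) by staged passes: first build an explicit suffix-sum table by accumulating over the reversed sorted list, then take max() of the directly computed candidates (n-j)*sufs[j]; B also does not mutate its argument.
import Mathlib
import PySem

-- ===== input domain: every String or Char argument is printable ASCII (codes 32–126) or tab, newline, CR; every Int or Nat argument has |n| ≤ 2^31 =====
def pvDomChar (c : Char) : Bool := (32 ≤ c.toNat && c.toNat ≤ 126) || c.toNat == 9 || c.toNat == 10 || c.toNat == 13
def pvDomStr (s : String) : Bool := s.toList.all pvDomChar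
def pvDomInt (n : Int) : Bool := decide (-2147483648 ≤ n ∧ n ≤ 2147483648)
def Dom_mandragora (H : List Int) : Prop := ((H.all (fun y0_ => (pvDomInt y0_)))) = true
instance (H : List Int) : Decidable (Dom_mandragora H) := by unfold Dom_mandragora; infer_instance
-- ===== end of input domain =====

-- B replaces A's backward incremental max-tracking loop by staged passes — an explicit
-- suffix-sum table built over the reversed sorted list, then a max over directly computed
-- candidates (return-value equivalence only: A sorts H in place, B does not).

-- ===== PORT A =====
-- while(k >= 0): body; k = k - 1   (temp_sol is reset to 0 each round and recomputed, so it is local here)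
def mandragoraLoopA (Hs : List Int) (k accumulated previous maxSol : Int) : Int :=
  if h : 0 ≤ k then
    let x := PySem.List.pyGetD Hs k 0
    let temp := previous - accumulated + (k + 1) * x
    mandragoraLoopA Hs (k - 1) (accumulated + x) temp (if temp > maxSol then temp else maxSol)
  else maxSol
termination_by (k + 1).toNat
decreasing_by omega

def mandragora (H : List Int) : Int :=
  let Hs := PySem.List.sorted H (id : Int → Int) false
  let n : Int := Hs.length
  let accumulated := PySem.List.pyGetD Hs (n - 1) 0
  let maxSol := n * PySem.List.pyGetD Hs (-1) 0
  mandragoraLoopA Hs (n - 2) accumulated maxSol maxSol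

-- ===== PORT B =====
-- for h in reversed(hs): acc += h; sufs.append(acc)  — state (sufs, acc)
def mandragora_alt (H : List Int) : Int :=
  let hs := PySem.List.sorted H (id : Int → Int) false
  let st := hs.reverse.foldl
    (fun (st : List Int × Int) h => (st.1 ++ [st.2 + h], st.2 + h)) ([], 0)
  let sufs := st.1
  let n : Int := hs.length
  -- max((n - j) * sufs[j] for j in range(n)); max([]) raises ValueError (excluded by Pre_)
  match (PySem.List.pyRange 0 n 1).map (fun j => (n - j) * PySem.List.pyGetD sufs j 0) with
  | [] => 0
  | x :: xs => xs.foldl max x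

-- ===== PRECONDITION & SPEC =====
-- Pre_ excludes only the empty list, on which A raises IndexError (H[-1]).
def Pre_mandragora (H : List Int) : Prop := H ≠ []
instance (H : List Int) : Decidable (Pre_mandragora H) := by unfold Pre_mandragora; infer_instance
def pvWitness_mandragora : List Int := ([3, 2, 5])

def Spec_mandragora (H : List Int) (out : Int) : Prop := out = mandragora_alt H
instance (H : List Int) (out : Int) : Decidable (Spec_mandragora H out) := by unfold Spec_mandragora; infer_instance

-- ===== CLAIM (what is proved, stated in full; the proofs are below) =====
def Claim_equal_mandragora : Prop := ∀ (H : List Int), Dom_mandragora H → Pre_mandragora H → Spec_mandragora H (mandragora H)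

-- ===== LEMMAS AND PROOFS =====

-- suffix sum from position k, and the k-th candidate value (k+1) * suffix
def pvSuf (s : List Int) (k : Nat) : Int := (s.drop k).sum
def pvCnd (s : List Int) (k : Nat) : Int := ((k : Int) + 1) * pvSuf s k

lemma pvSuf_succ (s : List Int) (k : Nat) (hk : k < s.length) :
    pvSuf s k = s[k] + pvSuf s (k + 1) := by
  unfold pvSuf
  rw [List.drop_eq_getElem_cons hk, List.sum_cons]

lemma if_gt_eq_max (a b : Int) : (if b > a then b else a) = max a b := by
  rcases max_cases a b with ⟨h, h2⟩ | ⟨h, h2⟩ <;> simp [h] <;> omega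

lemma loopA_step (Hs : List Int) (k a p m : Int) (h : 0 ≤ k) :
    mandragoraLoopA Hs k a p m =
      mandragoraLoopA Hs (k - 1) (a + PySem.List.pyGetD Hs k 0)
        (p - a + (k + 1) * PySem.List.pyGetD Hs k 0)
        (if p - a + (k + 1) * PySem.List.pyGetD Hs k 0 > m
         then p - a + (k + 1) * PySem.List.pyGetD Hs k 0 else m) := by
  rw [mandragoraLoopA, dif_pos h]

-- A's loop: parametrized by j = k+1, invariant acc = pvSuf s j, prev = (j+1) * pvSuf s j
lemma loopA_eq (s : List Int) : ∀ (j : Nat), j ≤ s.length → ∀ (m : Int),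
    mandragoraLoopA s ((j : Int) - 1) (pvSuf s j) (((j : Int) + 1) * pvSuf s j) m
      = ((List.range j).reverse.map (pvCnd s)).foldl max m := by
  intro j
  induction j with
  | zero =>
    intro _ m
    rw [mandragoraLoopA]
    simp
  | succ j ih =>
    intro hj m
    have hjlen : j < s.length := by omega
    have h0 : (0 : Int) ≤ ((j + 1 : Nat) : Int) - 1 := by push_cast; omega
    rw [loopA_step _ _ _ _ _ h0]
    have hx : PySem.List.pyGetD s (((j + 1 : Nat) : Int) - 1) 0 = s[j] := by
      have : (((j + 1 : Nat) : Int) - 1) = ((j : Nat) : Int) := by push_cast; ring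
      rw [this, PySem.List.pyGetD_natCast, List.getD_eq_getElem _ _ hjlen]
    rw [hx]
    have hsuf : pvSuf s j = s[j] + pvSuf s (j + 1) := pvSuf_succ s j hjlen
    have htemp : (((j + 1 : Nat) : Int) + 1) * pvSuf s (j + 1) - pvSuf s (j + 1)
        + ((((j + 1 : Nat) : Int) - 1) + 1) * s[j] = ((j : Int) + 1) * pvSuf s j := by
      rw [hsuf]; push_cast; ring
    have hacc : pvSuf s (j + 1) + s[j] = pvSuf s j := by rw [hsuf]; ring
    have hk1 : (((j + 1 : Nat) : Int) - 1) - 1 = ((j : Nat) : Int) - 1 := by push_cast; ring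
    rw [htemp, hacc, hk1, ih (by omega)]
    rw [List.range_succ, List.reverse_append]
    simp only [List.reverse_cons, List.reverse_nil, List.nil_append, List.singleton_append,
      List.map_cons, List.foldl_cons, if_gt_eq_max, pvCnd]

-- B's first pass: the accumulating fold builds the table of partial sums of r shifted by a
lemma buildSufs : ∀ (r pre : List Int) (a : Int),
    r.foldl (fun (st : List Int × Int) h => (st.1 ++ [st.2 + h], st.2 + h)) (pre, a)
      = (pre ++ (List.range r.length).map (fun j => a + (r.take (j + 1)).sum), a + r.sum) := by
  intro r
  induction r with
  | nil => intro pre a; simp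
  | cons x t ih =>
    intro pre a
    rw [List.foldl_cons, ih (pre ++ [a + x]) (a + x)]
    refine Prod.ext ?_ (by simp [add_assoc])
    simp only [List.length_cons, List.range_succ_eq_map, List.map_cons, List.map_map]
    simp [Function.comp, List.take_succ_cons, add_assoc]

-- (range (m+1)).map (g (m - ·)) lists g m first, then g over range m reversed
lemma range_reverse_eq_map (m : Nat) :
    (List.range m).reverse = (List.range m).map (fun i => m - 1 - i) := by
  rw [List.range_eq_range', List.reverse_range']
  simp only [Nat.zero_add, ← List.range_eq_range']

lemma rev_map_sub (g : Nat → Int) (m : Nat) :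
    (List.range (m + 1)).map (fun j => g (m - j))
      = g m :: (List.range m).reverse.map (fun j => g j) := by
  rw [List.range_succ_eq_map, List.map_cons, List.map_map, Nat.sub_zero,
    range_reverse_eq_map, List.map_map]
  congr 1
  apply List.map_congr_left
  intro j hj
  rw [List.mem_range] at hj
  simp only [Function.comp]
  congr 1
  omega

theorem mandragora_spec : Claim_equal_mandragora := by
  intro H _ hpre
  unfold Spec_mandragora
  set s := PySem.List.sorted H (id : Int → Int) false with hsdef
  have hsne : s ≠ [] := by
    intro h
    have := PySem.List.sorted_perm H (id : Int → Int) false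
    rw [← hsdef, h] at this
    exact hpre (this.nil_eq).symm
  have hn : 0 < s.length := List.length_pos_iff.mpr hsne
  set n := s.length with hndef
  -- A side
  have hlast : PySem.List.pyGetD s (-1) 0 = s[n - 1] := by
    rw [PySem.List.pyGetD_neg_one s 0 hsne, List.getLast_eq_getElem]
  have haccum : PySem.List.pyGetD s ((n : Int) - 1) 0 = s[n - 1] := by
    have : ((n : Int) - 1) = (((n - 1 : Nat) : Nat) : Int) := by push_cast; omega
    rw [this, PySem.List.pyGetD_natCast, List.getD_eq_getElem _ _ (by omega)]
  have hdropn : List.drop n s = [] := by rw [hndef]; exact List.drop_length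
  have hsufl : pvSuf s (n - 1) = s[n - 1] := by
    unfold pvSuf
    rw [List.drop_eq_getElem_cons (by omega)]
    have hnn : n - 1 + 1 = n := by omega
    rw [hnn, hdropn]
    simp
  have hA : mandragora H
      = ((List.range (n - 1)).reverse.map (pvCnd s)).foldl max (pvCnd s (n - 1)) := by
    show mandragoraLoopA s ((n : Int) - 2) (PySem.List.pyGetD s ((n : Int) - 1) 0)
        ((n : Int) * PySem.List.pyGetD s (-1) 0) ((n : Int) * PySem.List.pyGetD s (-1) 0)
      = _
    rw [hlast, haccum]
    have e4 : (n : Int) * s[n - 1] = pvCnd s (n - 1) := by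
      unfold pvCnd
      rw [hsufl]
      have : (((n - 1 : Nat) : Int) + 1) = (n : Int) := by push_cast; omega
      rw [this]
    rw [e4]
    have e2 : (s[n - 1] : Int) = pvSuf s (n - 1) := hsufl.symm
    rw [e2]
    have e1 : ((n : Int) - 2) = (((n - 1 : Nat) : Nat) : Int) - 1 := by push_cast; omega
    rw [e1]
    exact loopA_eq s (n - 1) (by omega) _
  -- B side: the built table is the list of suffix sums, read off back to front
  have hsufs : (s.reverse.foldl
      (fun (st : List Int × Int) h => (st.1 ++ [st.2 + h], st.2 + h)) ([], 0)).1
      = (List.range n).map (fun j => pvSuf s (n - 1 - j)) := by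
    rw [buildSufs s.reverse [] 0]
    simp only [List.nil_append, List.length_reverse, ← hndef]
    apply List.map_congr_left
    intro j hj
    rw [List.mem_range] at hj
    have htr : s.reverse.take (j + 1) = (s.drop (s.length - (j + 1))).reverse :=
      List.take_reverse
    rw [htr, List.sum_reverse]
    have : s.length - (j + 1) = n - 1 - j := by omega
    rw [this]
    unfold pvSuf
    ring
  -- the candidate list is the reversed-range map of pvCnd
  have hcands : (PySem.List.pyRange 0 (s.length : Int) 1).map
      (fun j => ((s.length : Int) - j) * PySem.List.pyGetD
        ((s.reverse.foldl (fun (st : List Int × Int) h => (st.1 ++ [st.2 + h], st.2 + h)) ([], 0)).1) j 0)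
      = pvCnd s (n - 1) :: (List.range (n - 1)).reverse.map (pvCnd s) := by
    rw [hsufs, PySem.List.pyRange_one, List.map_map]
    have hmc : ∀ (j : Nat), j < n →
        ((fun (j : Int) => ((s.length : Int) - j) * PySem.List.pyGetD
          ((List.range n).map (fun j => pvSuf s (n - 1 - j))) j 0) ∘ (fun k : Nat => (0 : Int) + k)) j
          = pvCnd s (n - 1 - j) := by
      intro j hj
      simp only [Function.comp, zero_add, PySem.List.pyGetD_natCast]
      rw [PySem.List.getD_map_range _ _ _ _ hj]
      unfold pvCnd
      have : ((s.length : Int) - j) = (((n - 1 - j : Nat) : Int) + 1) := by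
        rw [← hndef]; push_cast; omega
      rw [this]
    have hlen : ((s.length : Int) - 0).toNat = n := by rw [← hndef]; omega
    rw [hlen]
    have hfull : (List.range n).map
        ((fun (j : Int) => ((s.length : Int) - j) * PySem.List.pyGetD
          ((List.range n).map (fun j => pvSuf s (n - 1 - j))) j 0) ∘ (fun k : Nat => (0 : Int) + k))
        = (List.range n).map (fun j => pvCnd s (n - 1 - j)) := by
      apply List.map_congr_left
      intro j hj
      exact hmc j (List.mem_range.mp hj)
    rw [hfull]
    have hr : List.range n = List.range ((n - 1) + 1) := by congr 1; omega
    rw [hr, rev_map_sub (pvCnd s) (n - 1)]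
  have hB : mandragora_alt H
      = ((List.range (n - 1)).reverse.map (pvCnd s)).foldl max (pvCnd s (n - 1)) := by
    show (match (PySem.List.pyRange 0 (s.length : Int) 1).map
        (fun j => ((s.length : Int) - j) * PySem.List.pyGetD
          ((s.reverse.foldl (fun (st : List Int × Int) h => (st.1 ++ [st.2 + h], st.2 + h)) ([], 0)).1) j 0) with
      | [] => (0 : Int)
      | x :: xs => xs.foldl max x) = _
    rw [hcands]
  rw [hA, hB]
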